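-- pv_equiv track=rewrite | github.com/YuriZmytrakov/data-structures-algorithms | Sorting.py | Orders
-- ===== SOURCE A (Python) =====
-- def Orders(array, start, end):
--     if len(start) < 1:
--         array.append(end)
--         return array
--     else:
--         n = len(start)
--         i = 0
--         while i <= n-1:
--             next_end = end + start[i:i+1]
--             next_start = start[:i] + start[i+1:]
--             i += 1
--             Orders(array, next_start, next_end)
--     return array
-- ===== SOURCE B (Python) =====
-- def Orders(array, start, end):
--     # Iterative: enumerate all n! arrangements by decoding each counter value's
--     # factorial-base (Lehmer) code into a selection sequence; no recursion.
--     n = len(start)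
--     fact = 1
--     for m in range(2, n + 1):
--         fact *= m
--     for code in range(fact):
--         avail = list(range(n))
--         cur = end
--         f = fact
--         k = code
--         for m in range(n, 0, -1):
--             f //= m
--             d = k // f
--             k = k % f
--             j = avail.pop(d)
--             cur = cur + start[j:j+1]
--         array.append(cur)
--     return array
-- ===== Notes on version B (the rewrite author's own statement) =====
-- stated objective: alternative
-- what changed: A's recursive backtracking over shrinking start/growing end is replaced by a single iterative pass that decodes each counter value 0..n!-1 in factorial base (Lehmer code) into one arrangement; both still append the same n! strings in the same order to array.
import Mathlib
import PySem

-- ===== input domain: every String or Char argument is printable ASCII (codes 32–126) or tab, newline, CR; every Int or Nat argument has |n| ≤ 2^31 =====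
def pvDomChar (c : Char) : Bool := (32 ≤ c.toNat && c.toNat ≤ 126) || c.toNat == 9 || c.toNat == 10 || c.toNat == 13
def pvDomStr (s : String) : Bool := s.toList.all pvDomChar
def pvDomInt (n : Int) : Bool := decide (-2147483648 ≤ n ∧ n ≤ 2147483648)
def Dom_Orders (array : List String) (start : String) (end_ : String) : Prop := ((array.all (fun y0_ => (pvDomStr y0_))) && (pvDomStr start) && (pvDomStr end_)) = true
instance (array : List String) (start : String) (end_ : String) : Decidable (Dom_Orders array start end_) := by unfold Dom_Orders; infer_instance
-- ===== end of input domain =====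

-- B replaces A's recursion by one iterative pass decoding each counter 0..n!-1 in factorial
-- base (Lehmer code) into an arrangement; both A and B also mutate `array` by appending the
-- same strings in the same order (the theorems below are about the returned value).

-- ===== PORT A =====
-- A's recursion on the characters of `start`; Python slices start[:i], start[i+1:],
-- start[i:i+1] are exact as take i / drop (i+1) / (drop i).take 1 for the loop's 0 ≤ i.
def ordersAux (array : List String) (start : List Char) (end_ : List Char) : List String :=
  if start.length < 1 then array ++ [String.ofList end_]
  else
    -- while i <= n-1: recurse with next_start, next_end
    (List.range start.length).attach.foldl
      (fun acc i =>
        ordersAux acc (start.take i.1 ++ start.drop (i.1 + 1))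
          (end_ ++ (start.drop i.1).take 1))
      array
termination_by start.length
decreasing_by
  have hi := List.mem_range.mp i.2
  simp only [List.length_append, List.length_take, List.length_drop]
  omega

def Orders (array : List String) (start : String) (end_ : String) : List String :=
  ordersAux array start.toList end_.toList

-- ===== PORT B =====
-- fact = 1; for m in range(2, n+1): fact *= m
def bFact (n : Nat) : Nat := (List.range' 2 (n - 1)).foldl (fun a m => a * m) 1

-- for m in range(n, 0, -1): f //= m; d = k // f; k = k % f; j = avail.pop(d); cur += start[j:j+1]
-- (every loop value is a non-negative int, so Nat / and % are exact for Python's // and %;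
-- avail.pop(d) with the always-in-range d is getD + eraseIdx)
def bDecode (start : List Char) : Nat → List Nat → List Char → Nat → Nat → List Char
  | 0, _, cur, _, _ => cur
  | m + 1, avail, cur, f, k =>
    let f' := f / (m + 1)
    let d := k / f'
    let k' := k % f'
    let j := avail.getD d 0
    bDecode start m (avail.eraseIdx d) (cur ++ (start.drop j).take 1) f' k'

def Orders_alt (array : List String) (start : String) (end_ : String) : List String :=
  let s := start.toList
  let n := s.length
  let fact := bFact n
  (List.range fact).foldl
    (fun acc code => acc ++ [String.ofList (bDecode s n (List.range n) end_.toList fact code)])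
    array

-- ===== PRECONDITION & SPEC =====
def Spec_Orders (array : List String) (start : String) (end_ : String) (out : List String) : Prop := out = Orders_alt array start end_
instance (array : List String) (start : String) (end_ : String) (out : List String) : Decidable (Spec_Orders array start end_ out) := by unfold Spec_Orders; infer_instance

-- ===== CLAIM (what is proved, stated in full; the proofs are below) =====
def Claim_equal_Orders : Prop := ∀ (array : List String) (start : String) (end_ : String), Dom_Orders array start end_ → Spec_Orders array start end_ (Orders array start end_)

-- ===== LEMMAS AND PROOFS =====

-- unfolding of PySem.List.permutations at a successor budget (every selected index is in range)
theorem permutations_succ {α : Type} (d : α) (xs : List α) (r : Nat) :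
    PySem.List.permutations xs (r + 1) =
      (List.range xs.length).flatMap
        (fun i => (PySem.List.permutations (xs.eraseIdx i) r).map (fun p => xs.getD i d :: p)) := by
  rw [PySem.List.permutations]
  apply List.flatMap_congr
  intro i hi
  have h : i < xs.length := List.mem_range.mp hi
  simp [List.getElem?_eq_getElem h]

-- A's recursion returns `array` followed by end_ ++ p over the selection-ordered permutations
theorem ordersAux_eq (m : Nat) : ∀ (s : List Char), s.length = m → ∀ (e : List Char) (array : List String),
    ordersAux array s e =
      array ++ (PySem.List.permutations s m).map (fun p => String.ofList (e ++ p)) := by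
  induction m with
  | zero =>
    intro s hs e array
    rw [ordersAux.eq_def]
    simp_all [PySem.List.permutations, List.length_eq_zero_iff]
  | succ m ih =>
    intro s hs e array
    rw [ordersAux.eq_def, if_neg (by omega)]
    have hstep : (fun (acc : List String) (i : {x // x ∈ List.range s.length}) =>
          ordersAux acc (s.take i.1 ++ s.drop (i.1 + 1)) (e ++ (s.drop i.1).take 1)) =
        (fun acc i => acc ++ ((PySem.List.permutations (s.eraseIdx i.1) m).map
                  (fun p => String.ofList (e ++ (s.drop i.1).take 1 ++ p)))) := by
      funext acc i
      have hi : i.1 < s.length := List.mem_range.mp i.2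
      rw [← List.eraseIdx_eq_take_drop_succ]
      rw [ih (s.eraseIdx i.1) (by rw [List.length_eraseIdx_of_lt hi]; omega)]
    rw [hstep, PySem.List.foldl_append_eq_flatMap]
    congr 1
    have hattach : (List.range s.length).attach.flatMap
        (fun i => (PySem.List.permutations (s.eraseIdx i.1) m).map
          (fun p => String.ofList (e ++ (s.drop i.1).take 1 ++ p))) =
        (List.range s.length).flatMap
        (fun i => (PySem.List.permutations (s.eraseIdx i) m).map
          (fun p => String.ofList (e ++ (s.drop i).take 1 ++ p))) := by
      conv_rhs => rw [← List.attach_map_subtype_val (List.range s.length)]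
      rw [List.flatMap_map]
    rw [hattach, permutations_succ 'a', List.map_flatMap]
    apply List.flatMap_congr
    intro i hi
    have h : i < s.length := List.mem_range.mp hi
    rw [List.map_map]
    have ht : (s.drop i).take 1 = [s.getD i 'a'] := by
      rw [List.drop_eq_getElem_cons h, List.take_succ_cons, List.take_zero,
        List.getD_eq_getElem s 'a' h]
    rw [ht]
    apply List.map_congr_left
    intro p _
    simp

-- range over a product decomposes into blocks
theorem range_mul_map {β : Type} (a b : Nat) (g : Nat → β) :
    (List.range (a * b)).map g =
      (List.range a).flatMap (fun d => (List.range b).map (fun r => g (d * b + r))) := by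
  induction a with
  | zero => simp
  | succ a ih =>
    have h1 : (a + 1) * b = a * b + b := by ring
    rw [h1, List.range_add, List.map_append, ih, List.range_succ, List.flatMap_append]
    simp [List.map_map, Function.comp]

-- B's decoding loop enumerates exactly the selection-ordered permutations of avail
theorem bDecode_map (s : List Char) : ∀ (m : Nat) (avail : List Nat), avail.length = m →
    ∀ (cur : List Char),
    (List.range m.factorial).map (fun k => bDecode s m avail cur m.factorial k) =
      (PySem.List.permutations avail m).map
        (fun p => cur ++ p.flatMap (fun j => (s.drop j).take 1)) := by
  intro m
  induction m with
  | zero =>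
    intro avail h cur
    simp [bDecode, PySem.List.permutations, Nat.factorial]
  | succ m ih =>
    intro avail h cur
    rw [Nat.factorial_succ, range_mul_map, permutations_succ 0, List.map_flatMap, h]
    apply List.flatMap_congr
    intro d hd
    have hd' : d < m + 1 := List.mem_range.mp hd
    have hstep : ∀ r ∈ List.range m.factorial,
        bDecode s (m + 1) avail cur ((m + 1) * m.factorial) (d * m.factorial + r) =
        bDecode s m (avail.eraseIdx d)
          (cur ++ (s.drop (avail.getD d 0)).take 1) m.factorial r := by
      intro r hr
      have hr' : r < m.factorial := List.mem_range.mp hr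
      have hf : ((m + 1) * m.factorial) / (m + 1) = m.factorial :=
        Nat.mul_div_cancel_left _ (Nat.succ_pos m)
      have hdiv : (d * m.factorial + r) / m.factorial = d := by
        rw [Nat.mul_comm, Nat.mul_add_div m.factorial_pos, Nat.div_eq_of_lt hr']
        omega
      have hmod : (d * m.factorial + r) % m.factorial = r := by
        rw [Nat.mul_comm, Nat.mul_add_mod, Nat.mod_eq_of_lt hr']
      simp only [bDecode, hf, hdiv, hmod]
    rw [List.map_congr_left hstep,
        ih (avail.eraseIdx d) (by rw [List.length_eraseIdx_of_lt (by omega)]; omega)]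
    rw [List.map_map]
    apply List.map_congr_left
    intro p _
    simp

-- permutations is natural in a map of the elements
theorem permutations_map (f : Nat → Char) : ∀ (m : Nat) (l : List Nat),
    PySem.List.permutations (l.map f) m = (PySem.List.permutations l m).map (List.map f) := by
  intro m
  induction m with
  | zero => intro l; simp [PySem.List.permutations]
  | succ m ih =>
    intro l
    rw [permutations_succ (f 0), permutations_succ 0, List.map_flatMap, List.length_map]
    apply List.flatMap_congr
    intro i hi
    have h : i < l.length := List.mem_range.mp hi
    rw [List.eraseIdx_map, ih, List.map_map, List.map_map]
    apply List.map_congr_left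
    intro p _
    simp

theorem flatMap_take_one (s : List Char) (c : Char) : ∀ (p : List Nat), (∀ x ∈ p, x < s.length) →
    p.flatMap (fun j => (s.drop j).take 1) = p.map (fun j => s.getD j c) := by
  intro p
  induction p with
  | nil => simp
  | cons x xs ih =>
    intro h
    have hx : x < s.length := h x (by simp)
    simp only [List.flatMap_cons, List.map_cons]
    rw [ih (fun y hy => h y (by simp [hy])), List.drop_eq_getElem_cons hx]
    simp only [List.take_succ_cons, List.take_zero, List.cons_append, List.nil_append,
      List.getD, List.getElem?_eq_getElem hx, Option.getD_some]

theorem map_getD_range (s : List Char) (c : Char) :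
    (List.range s.length).map (fun i => s.getD i c) = s := by
  refine List.ext_getElem (by simp) ?_
  intro i h1 h2
  simp [List.getD, List.getElem?_eq_getElem h2]

theorem bFact_eq (n : Nat) : bFact n = n.factorial := by
  induction n with
  | zero => simp [bFact]
  | succ n ih =>
    cases n with
    | zero => simp [bFact]
    | succ n =>
      unfold bFact
      have h : (n + 2) - 1 = (n + 1 - 1) + 1 := by omega
      rw [h, List.range'_1_concat, List.foldl_append]
      unfold bFact at ih
      rw [ih]
      simp [Nat.factorial_succ]
      ring

-- ===== VERDICT (by name: the statement is the Claim_ definition above) =====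
theorem Orders_spec : Claim_equal_Orders := by
  intro array start end_ _
  unfold Spec_Orders Orders Orders_alt
  set s := start.toList with hsdef
  set e := end_.toList with hedef
  set n := s.length with hndef
  rw [PySem.List.foldl_append_singleton_eq_map, ordersAux_eq n s rfl e array, bFact_eq]
  congr 1
  have h2 := congrArg (List.map String.ofList)
    (bDecode_map s n (List.range n) (by simp) e)
  simp only [List.map_map] at h2
  rw [show (fun code => String.ofList (bDecode s n (List.range n) e n.factorial code)) =
      (String.ofList ∘ fun k => bDecode s n (List.range n) e n.factorial k) from rfl, h2]
  have hbridge : ∀ p ∈ PySem.List.permutations (List.range n) n,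
      (String.ofList ∘ fun q => e ++ q.flatMap (fun j => (s.drop j).take 1)) p =
      String.ofList (e ++ p.map (fun j => s.getD j 'a')) := by
    intro p hp
    have hperm : p.Perm (List.range n) :=
      PySem.List.perm_of_mem_permutations (by simpa using hp)
    have hmem : ∀ x ∈ p, x < s.length := by
      intro x hx
      have := hperm.mem_iff.mp hx
      exact List.mem_range.mp this
    simp [flatMap_take_one s 'a' p hmem]
  rw [List.map_congr_left hbridge]
  conv_lhs => rw [show s = (List.range n).map (fun i => s.getD i 'a') from
    (map_getD_range s 'a').symm]
  rw [permutations_map, List.map_map]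
  apply List.map_congr_left
  intro p _
  simp
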